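-- pv_equiv track=rewrite | github.com/Manillin/Notes | playground/adventOfCode/day2.py | sum_invalid_in_range
-- ===== SOURCE A (Python) =====
-- def sum_invalid_in_range(start: int, end: int):
--     total = 0
--     max_half = len(str(end)) // 2
--     for h in range(1, max_half + 1):
--         mult = 10**h + 1
--         min_x = (start + mult - 1) // mult
--         max_x = end // mult
--         low = max(min_x, 10**(h - 1))
--         high = min(max_x, 10**h - 1)
--         if low <= high:
--             count = high - low + 1
--             sum_x = (low + high) * count // 2
--             total += mult * sum_x
--     return total
-- ===== SOURCE B (Python) =====
-- def sum_invalid_in_range(start: int, end: int):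
--     total = 0
--     max_half = len(str(end)) // 2
--     for h in range(1, max_half + 1):
--         mult = 10**h + 1
--         for x in range(10**(h - 1), 10**h):
--             val = mult * x
--             if start <= val <= end:
--                 total += val
--     return total
-- ===== Notes on version B (the rewrite author's own statement) =====
-- stated objective: alternative
-- what changed: Replaces the closed-form arithmetic-series summation (ceil/floor bounds plus Gauss formula) by direct enumeration: for each half-length h it iterates over every h-digit first half x and adds mult*x whenever it lies in [start, end].
import Mathlib
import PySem

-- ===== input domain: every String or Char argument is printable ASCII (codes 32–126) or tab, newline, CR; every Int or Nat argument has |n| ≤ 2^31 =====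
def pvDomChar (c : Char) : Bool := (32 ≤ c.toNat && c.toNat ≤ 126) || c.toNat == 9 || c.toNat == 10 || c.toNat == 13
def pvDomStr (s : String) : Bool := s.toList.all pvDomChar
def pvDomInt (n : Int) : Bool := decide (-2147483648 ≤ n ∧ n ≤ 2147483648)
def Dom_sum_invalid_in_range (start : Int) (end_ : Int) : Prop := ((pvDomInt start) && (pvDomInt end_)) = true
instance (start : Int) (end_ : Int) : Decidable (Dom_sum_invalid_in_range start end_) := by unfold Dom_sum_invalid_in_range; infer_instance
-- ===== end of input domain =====

-- B enumerates the in-range "invalid" numbers mult*x directly instead of summing an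
-- arithmetic series in closed form; alternative decomposition, not faster.

-- ===== PORT A =====
-- 10**h is ported as 10 ^ h.toNat; exact, since every h drawn from range(1, max_half+1) satisfies h ≥ 1.
def sum_invalid_in_range (start : Int) (end_ : Int) : Int :=
  let max_half : Int := PySem.Int.floordiv ((PySem.Int.toChars end_).length : Int) 2
  (PySem.List.pyRange 1 (max_half + 1) 1).foldl (fun total h =>
    let mult : Int := 10 ^ h.toNat + 1
    let min_x := PySem.Int.floordiv (start + mult - 1) mult
    let max_x := PySem.Int.floordiv end_ mult
    let low := max min_x ((10 : Int) ^ (h - 1).toNat)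
    let high := min max_x ((10 : Int) ^ h.toNat - 1)
    if low ≤ high then
      let count := high - low + 1
      let sum_x := PySem.Int.floordiv ((low + high) * count) 2
      total + mult * sum_x
    else total) 0

-- ===== PORT B =====
def sum_invalid_in_range_alt (start : Int) (end_ : Int) : Int :=
  let max_half : Int := PySem.Int.floordiv ((PySem.Int.toChars end_).length : Int) 2
  (PySem.List.pyRange 1 (max_half + 1) 1).foldl (fun total h =>
    let mult : Int := 10 ^ h.toNat + 1
    (PySem.List.pyRange ((10 : Int) ^ (h - 1).toNat) ((10 : Int) ^ h.toNat) 1).foldl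
      (fun t x =>
        let val := mult * x
        if start ≤ val ∧ val ≤ end_ then t + val else t) total) 0

-- ===== PRECONDITION & SPEC =====
def Spec_sum_invalid_in_range (start : Int) (end_ : Int) (out : Int) : Prop := out = sum_invalid_in_range_alt start end_
instance (start : Int) (end_ : Int) (out : Int) : Decidable (Spec_sum_invalid_in_range start end_ out) := by unfold Spec_sum_invalid_in_range; infer_instance

-- ===== CLAIM (what is proved, stated in full; the proofs are below) =====
def Claim_equal_sum_invalid_in_range : Prop := ∀ (start : Int) (end_ : Int), Dom_sum_invalid_in_range start end_ → Spec_sum_invalid_in_range start end_ (sum_invalid_in_range start end_)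

-- ===== LEMMAS AND PROOFS =====

/-- Σ_{x = lo}^{hi} x (0 when the interval is empty). -/
def sumRange (lo hi : Int) : Int :=
  if _h : lo ≤ hi then lo + sumRange (lo + 1) hi else 0
termination_by (hi + 1 - lo).toNat
decreasing_by omega

lemma sumRange_of_gt {lo hi : Int} (h : hi < lo) : sumRange lo hi = 0 := by
  rw [sumRange]; simp [show ¬ lo ≤ hi by omega]

lemma sumRange_peel {lo hi : Int} (h : lo ≤ hi) : sumRange lo hi = lo + sumRange (lo + 1) hi := by
  rw [sumRange]; simp [h]

lemma sumRange_gauss : ∀ (n : Nat) (lo hi : Int), hi + 1 - lo ≤ (n : Int) →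
    2 * sumRange lo hi = if lo ≤ hi then (lo + hi) * (hi - lo + 1) else 0 := by
  intro n
  induction n with
  | zero => intro lo hi hn; rw [sumRange_of_gt (by omega), if_neg (by omega)]; ring
  | succ n ih =>
    intro lo hi hn
    by_cases h : lo ≤ hi
    · rw [sumRange_peel h, if_pos h, mul_add, ih (lo + 1) hi (by omega)]
      by_cases h2 : lo + 1 ≤ hi
      · rw [if_pos h2]; ring
      · rw [if_neg h2]
        have : lo = hi := by omega
        subst this; ring
    · rw [sumRange_of_gt (by omega), if_neg h]; ring

/-- A's closed-form per-h term equals the interval sum. -/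
lemma closed_form_eq_sumRange {low high : Int} (h : low ≤ high) :
    PySem.Int.floordiv ((low + high) * (high - low + 1)) 2 = sumRange low high := by
  have hg := sumRange_gauss (high + 1 - low).toNat low high (by omega)
  rw [if_pos h] at hg
  rw [← hg, PySem.Int.floordiv_eq_ediv_of_pos (by norm_num)]
  exact Int.mul_ediv_cancel_left _ (by norm_num)

/-- ceil bracket: ceildiv start mult ≤ x ↔ start ≤ mult * x. -/
lemma ceil_le_iff {m st x : Int} (hm : 0 < m) :
    PySem.Int.floordiv (st + m - 1) m ≤ x ↔ st ≤ m * x := by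
  have key := PySem.Int.le_floordiv_iff_mul_le (a := st + m - 1) (b := m) (q := x + 1) hm
  have hx : (x + 1) * m = m * x + m := by ring
  rw [hx] at key
  generalize m * x = P at key ⊢
  omega

/-- floor bracket: x ≤ floordiv end mult ↔ mult * x ≤ end. -/
lemma le_floor_iff {m e x : Int} (hm : 0 < m) :
    x ≤ PySem.Int.floordiv e m ↔ m * x ≤ e := by
  rw [PySem.Int.le_floordiv_iff_mul_le hm, mul_comm]

/-- The enumeration fold over [a, b) equals the accumulator plus mult times the
interval sum over the clipped bounds A computes. -/
lemma enum_eq (m st e : Int) (hm : 0 < m) :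
    ∀ (n : Nat) (a b s : Int), b - a ≤ (n : Int) →
    (PySem.List.pyRange a b 1).foldl
      (fun t x => if st ≤ m * x ∧ m * x ≤ e then t + m * x else t) s
    = s + m * sumRange (max (PySem.Int.floordiv (st + m - 1) m) a)
                       (min (PySem.Int.floordiv e m) (b - 1)) := by
  intro n
  induction n with
  | zero =>
    intro a b s hn
    rw [show PySem.List.pyRange a b 1 = [] by simp [PySem.List.pyRange]; omega]
    rw [List.foldl_nil, sumRange_of_gt (by omega), mul_zero, add_zero]
  | succ n ih =>
    intro a b s hn
    by_cases hab : a < b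
    · rw [PySem.List.pyRange_one_cons hab, List.foldl_cons]
      have hlo := ceil_le_iff (st := st) (x := a) hm
      have hhi := le_floor_iff (e := e) (x := a) hm
      set mn := PySem.Int.floordiv (st + m - 1) m with hmn
      set mx := PySem.Int.floordiv e m with hmx
      by_cases hcond : st ≤ m * a ∧ m * a ≤ e
      · rw [if_pos hcond, ih (a + 1) b (s + m * a) (by omega)]
        have hma : mn ≤ a := hlo.mpr hcond.1
        have hmb : a ≤ mx := hhi.mpr hcond.2
        rw [show max mn a = a by omega, show max mn (a + 1) = a + 1 by omega,
            sumRange_peel (show a ≤ min mx (b - 1) by omega)]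
        ring
      · rw [if_neg hcond, ih (a + 1) b s (by omega)]
        by_cases hmna : mn ≤ a
        · -- then a > mx: both clipped intervals are empty
          have hmxa : mx < a := by
            by_contra hc
            exact hcond ⟨hlo.mp hmna, hhi.mp (by omega)⟩
          rw [sumRange_of_gt (by omega), sumRange_of_gt (by omega)]
        · -- a < mn: both clipped lower bounds are mn
          rw [show max mn a = mn by omega, show max mn (a + 1) = mn by omega]
    · rw [show PySem.List.pyRange a b 1 = [] by simp [PySem.List.pyRange]; omega]
      rw [List.foldl_nil, sumRange_of_gt (by omega), mul_zero, add_zero]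

/-- Per-h body equality between the two ports, for generic mult m and window [a, b). -/
lemma body_gen (st e total m a b : Int) (hm : 0 < m) :
    (if max (PySem.Int.floordiv (st + m - 1) m) a ≤ min (PySem.Int.floordiv e m) (b - 1) then
       total + m * PySem.Int.floordiv
         ((max (PySem.Int.floordiv (st + m - 1) m) a + min (PySem.Int.floordiv e m) (b - 1)) *
          (min (PySem.Int.floordiv e m) (b - 1) - max (PySem.Int.floordiv (st + m - 1) m) a + 1)) 2
     else total)
  = (PySem.List.pyRange a b 1).foldl
      (fun t x => if st ≤ m * x ∧ m * x ≤ e then t + m * x else t) total := by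
  rw [enum_eq m st e hm (b - a).toNat a b total (by omega)]
  set low := max (PySem.Int.floordiv (st + m - 1) m) a
  set high := min (PySem.Int.floordiv e m) (b - 1)
  by_cases hle : low ≤ high
  · rw [if_pos hle, closed_form_eq_sumRange hle]
  · rw [if_neg hle, sumRange_of_gt (by omega), mul_zero, add_zero]

-- ===== VERDICT (by name: the statement is the Claim_ definition above) =====
theorem sum_invalid_in_range_spec : Claim_equal_sum_invalid_in_range := by
  intro start end_ _
  unfold Spec_sum_invalid_in_range sum_invalid_in_range sum_invalid_in_range_alt
  exact congrArg
    (fun f : Int → Int → Int => List.foldl f 0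
      (PySem.List.pyRange 1 (PySem.Int.floordiv ((PySem.Int.toChars end_).length : Int) 2 + 1) 1))
    (funext fun total => funext fun h =>
      body_gen start end_ total (10 ^ h.toNat + 1) ((10 : Int) ^ (h - 1).toNat)
        ((10 : Int) ^ h.toNat) (by positivity))
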